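-- pv_equiv track=rewrite | github.com/devlovasit-source/cloudbackend | brain/utils/style_explainer.py | _has_balance
-- ===== SOURCE A (Python) =====
-- from typing import List, Dict
--
-- def _has_balance(fits: List[str]) -> bool:
--
--     combos = [
--         ("slim", "relaxed"),
--         ("oversized", "slim"),
--     ]
--
--     for f1 in fits:
--         for f2 in fits:
--             if f1 == f2:
--                 continue
--             for a, b in combos:
--                 if (a in f1 and b in f2) or (a in f2 and b in f1):
--                     return True
--
--     return False
-- ===== SOURCE B (Python) =====
-- def _has_balance(fits):
--     combos = [
--         ("slim", "relaxed"),
--         ("oversized", "slim"),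
--     ]
--     uniq = list(dict.fromkeys(fits))
--     for a, b in combos:
--         xs = [s for s in uniq if a in s]
--         ys = [s for s in uniq if b in s]
--         if xs and ys and (len(xs) > 1 or len(ys) > 1 or xs[0] != ys[0]):
--             return True
--     return False
-- ===== Notes on version B (the rewrite author's own statement) =====
-- stated objective: faster
-- what changed: Replaced the quadratic all-pairs scan by one linear pass per combo: dedup the list once, collect the distinct strings containing each combo label, and a balancing pair exists iff both collections are nonempty and are not the same single string.
import Mathlib
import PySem

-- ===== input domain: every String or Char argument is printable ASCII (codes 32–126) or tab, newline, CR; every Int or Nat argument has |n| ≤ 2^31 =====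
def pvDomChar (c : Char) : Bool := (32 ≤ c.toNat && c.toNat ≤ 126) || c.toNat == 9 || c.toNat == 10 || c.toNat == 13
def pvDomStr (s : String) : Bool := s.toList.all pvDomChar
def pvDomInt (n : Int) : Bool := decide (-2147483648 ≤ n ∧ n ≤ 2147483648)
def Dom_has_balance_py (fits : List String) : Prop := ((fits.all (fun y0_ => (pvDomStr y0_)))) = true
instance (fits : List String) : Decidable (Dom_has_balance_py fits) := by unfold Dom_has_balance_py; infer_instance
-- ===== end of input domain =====

-- B replaces A's O(n^2) all-pairs scan by a dedup plus one linear filter pass per combo (faster, asymptotic).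

-- ===== PORT A =====
def has_balance_py (fits : List String) : Bool :=
  let combos : List (String × String) := [("slim", "relaxed"), ("oversized", "slim")]
  fits.any fun f1 => fits.any fun f2 =>
    !(f1 == f2) && combos.any fun c =>
      (PySem.Str.isIn c.1 f1 && PySem.Str.isIn c.2 f2) ||
      (PySem.Str.isIn c.1 f2 && PySem.Str.isIn c.2 f1)

-- ===== PORT B =====
def has_balance_py_alt (fits : List String) : Bool :=
  let combos : List (String × String) := [("slim", "relaxed"), ("oversized", "slim")]
  let uniq := PySem.List.dedup fits
  combos.any fun c =>
    let xs := uniq.filter fun s => PySem.Str.isIn c.1 s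
    let ys := uniq.filter fun s => PySem.Str.isIn c.2 s
    !xs.isEmpty && !ys.isEmpty &&
      (decide (1 < xs.length) || decide (1 < ys.length) || xs.head? != ys.head?)

-- ===== PRECONDITION & SPEC =====
def Spec_has_balance_py (fits : List String) (out : Bool) : Prop := out = has_balance_py_alt fits
instance (fits : List String) (out : Bool) : Decidable (Spec_has_balance_py fits out) := by unfold Spec_has_balance_py; infer_instance

-- ===== CLAIM (what is proved, stated in full; the proofs are below) =====
def Claim_equal_has_balance_py : Prop := ∀ (fits : List String), Dom_has_balance_py fits → Spec_has_balance_py fits (has_balance_py fits)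

-- ===== LEMMAS AND PROOFS =====

-- B's per-combo test on nodup lists is exactly "there is a pair of DIFFERENT strings, one in xs, one in ys".
lemma pvPair_prop {xs ys : List String} (hx : xs.Nodup) (hy : ys.Nodup) :
    ((xs.isEmpty = false ∧ ys.isEmpty = false) ∧
      ((1 < xs.length ∨ 1 < ys.length) ∨ xs.head? ≠ ys.head?))
    ↔ ∃ s ∈ xs, ∃ t ∈ ys, s ≠ t := by
  constructor
  · rintro ⟨⟨hxe, hye⟩, hc⟩
    match xs, ys, hx, hy, hxe, hye with
    | x1 :: xs', y1 :: ys', hx, hy, _, _ =>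
      rcases hc with (hlx | hly) | hhd
      · cases xs' with
        | nil => simp at hlx
        | cons x2 l =>
          have hne : x1 ≠ x2 := by
            intro he; exact (List.nodup_cons.mp hx).1 (he ▸ List.mem_cons_self ..)
          by_cases h1 : x1 = y1
          · exact ⟨x2, by simp, y1, by simp, fun he => hne (h1.trans he.symm)⟩
          · exact ⟨x1, by simp, y1, by simp, h1⟩
      · cases ys' with
        | nil => simp at hly
        | cons y2 l =>
          have hne : y1 ≠ y2 := by
            intro he; exact (List.nodup_cons.mp hy).1 (he ▸ List.mem_cons_self ..)
          by_cases h1 : x1 = y1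
          · exact ⟨x1, by simp, y2, by simp, fun he => hne (h1 ▸ he)⟩
          · exact ⟨x1, by simp, y1, by simp, h1⟩
      · exact ⟨x1, by simp, y1, by simp, by simpa using hhd⟩
  · rintro ⟨s, hs, t, ht, hst⟩
    have hxe : xs.isEmpty = false := by cases xs with | nil => cases hs | cons a l => rfl
    have hye : ys.isEmpty = false := by cases ys with | nil => cases ht | cons a l => rfl
    refine ⟨⟨hxe, hye⟩, ?_⟩
    by_cases hlx : 1 < xs.length
    · exact Or.inl (Or.inl hlx)
    by_cases hly : 1 < ys.length
    · exact Or.inl (Or.inr hly)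
    refine Or.inr ?_
    have hx1 : xs.length = 1 := by
      have := List.length_pos_of_mem hs; omega
    have hy1 : ys.length = 1 := by
      have := List.length_pos_of_mem ht; omega
    obtain ⟨x, rfl⟩ := List.length_eq_one_iff.mp hx1
    obtain ⟨y, rfl⟩ := List.length_eq_one_iff.mp hy1
    simp only [List.mem_singleton] at hs ht
    subst hs; subst ht
    simpa using hst

-- one combo on the B side, stated on the original list
lemma pvCombo_prop (fits : List String) (a b : String) :
    (((List.filter (fun s => PySem.Str.isIn a s) (PySem.List.dedup fits)).isEmpty = false ∧
        (List.filter (fun s => PySem.Str.isIn b s) (PySem.List.dedup fits)).isEmpty = false) ∧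
      ((1 < (List.filter (fun s => PySem.Str.isIn a s) (PySem.List.dedup fits)).length ∨
          1 < (List.filter (fun s => PySem.Str.isIn b s) (PySem.List.dedup fits)).length) ∨
        (List.filter (fun s => PySem.Str.isIn a s) (PySem.List.dedup fits)).head? ≠
          (List.filter (fun s => PySem.Str.isIn b s) (PySem.List.dedup fits)).head?))
    ↔ ∃ s ∈ fits, ∃ t ∈ fits, s ≠ t ∧ PySem.Str.isIn a s = true ∧ PySem.Str.isIn b t = true := by
  rw [pvPair_prop ((PySem.List.nodup_dedup fits).filter _) ((PySem.List.nodup_dedup fits).filter _)]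
  constructor
  · rintro ⟨s, hs, t, ht, hst⟩
    rw [List.mem_filter] at hs ht
    exact ⟨s, (PySem.List.mem_dedup _ _).mp hs.1, t, (PySem.List.mem_dedup _ _).mp ht.1,
           hst, hs.2, ht.2⟩
  · rintro ⟨s, hs, t, ht, hst, ha, hb⟩
    exact ⟨s, List.mem_filter.mpr ⟨(PySem.List.mem_dedup _ _).mpr hs, ha⟩,
           t, List.mem_filter.mpr ⟨(PySem.List.mem_dedup _ _).mpr ht, hb⟩, hst⟩

-- ===== VERDICT (by name: the statement is the Claim_ definition above) =====
theorem has_balance_py_spec : Claim_equal_has_balance_py := by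
  intro fits _
  unfold Spec_has_balance_py
  rw [Bool.eq_iff_iff]
  unfold has_balance_py has_balance_py_alt
  simp only [List.any_cons, List.any_nil, Bool.or_false, List.any_eq_true, Bool.and_eq_true,
    Bool.or_eq_true, Bool.not_eq_true', beq_eq_false_iff_ne, decide_eq_true_eq, bne_iff_ne]
  rw [pvCombo_prop fits "slim" "relaxed", pvCombo_prop fits "oversized" "slim"]
  constructor
  · rintro ⟨f1, h1, f2, h2, hne, (⟨ha, hb⟩ | ⟨ha, hb⟩) | (⟨ha, hb⟩ | ⟨ha, hb⟩)⟩
    · exact Or.inl ⟨f1, h1, f2, h2, hne, ha, hb⟩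
    · exact Or.inl ⟨f2, h2, f1, h1, hne.symm, ha, hb⟩
    · exact Or.inr ⟨f1, h1, f2, h2, hne, ha, hb⟩
    · exact Or.inr ⟨f2, h2, f1, h1, hne.symm, ha, hb⟩
  · rintro (⟨s, hs, t, ht, hst, ha, hb⟩ | ⟨s, hs, t, ht, hst, ha, hb⟩)
    · exact ⟨s, hs, t, ht, hst, Or.inl (Or.inl ⟨ha, hb⟩)⟩
    · exact ⟨s, hs, t, ht, hst, Or.inr (Or.inl ⟨ha, hb⟩)⟩
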